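-- pv_equiv track=rewrite | github.com/dmhysht/advent_of_code_2021 | day16/a-o-c-2021-day-16.py | __handle_literal
-- ===== SOURCE A (Python) =====
-- def __handle_literal(i, decoded):
--     if i >= len(decoded):
--         return i, 0
--     done = False
--     last_group = False
--     counting = False
--     collecting_counter = 0
--     b_collector = ""
--     while not done:
--         if not counting:
--             if decoded[i] == '0':
--                 last_group = True
--             counting = True
--         else:
--             if collecting_counter == 4:
--                 if last_group:
--                     done = True
--                     continue
--                 collecting_counter = 0
--                 counting = False
--                 continue
--             else:
--                 b_collector += decoded[i]
--                 collecting_counter += 1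
--         i += 1
--
--     return i, int(b_collector, 2)
-- ===== SOURCE B (Python) =====
-- def __handle_literal(i, decoded):
--     if i >= len(decoded):
--         return i, 0
--     # pass 1: scan only the flag bits to count the groups
--     k = 0
--     while decoded[i + 5 * k] != '0':
--         k += 1
--     # pass 2: gather each group's four data bits by direct position arithmetic
--     bits = "".join(decoded[i + 5 * j + 1 + m] for j in range(k + 1) for m in range(4))
--     return i + 5 * (k + 1), int(bits, 2)
-- ===== Notes on version B (the rewrite author's own statement) =====
-- stated objective: simpler
-- what changed: Replaces A's interleaved single-pass state machine (flags done/last_group/counting/collecting_counter mutated bit by bit) with two staged passes: first a scan over only the flag bits at positions i+5k to find the group count, then a comprehension that gathers each group's four data bits by direct position arithmetic i+5j+1+m; the final index is the closed form i+5(k+1).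
import Mathlib
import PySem

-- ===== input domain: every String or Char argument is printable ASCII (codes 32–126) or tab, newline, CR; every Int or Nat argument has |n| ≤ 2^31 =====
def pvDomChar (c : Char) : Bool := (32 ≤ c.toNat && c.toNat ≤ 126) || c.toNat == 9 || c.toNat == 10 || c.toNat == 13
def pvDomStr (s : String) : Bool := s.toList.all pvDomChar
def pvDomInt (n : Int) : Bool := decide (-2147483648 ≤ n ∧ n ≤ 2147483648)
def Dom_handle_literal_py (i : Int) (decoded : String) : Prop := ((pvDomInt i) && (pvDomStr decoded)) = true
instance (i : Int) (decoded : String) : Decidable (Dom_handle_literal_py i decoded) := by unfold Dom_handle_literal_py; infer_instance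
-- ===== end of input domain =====

-- B replaces A's interleaved five-flag state machine with two staged passes (a flag-only
-- scan counting groups, then positional extraction of the data bits): simpler; same
-- return value wherever A returns normally.

-- ===== PORT A =====
-- A's while-loop, step for step, over the same state (done, last_group, counting,
-- collecting_counter, b_collector, i); fuel only makes the recursion total — inside
-- Pre_ it is always sufficient; none = IndexError / fuel exhausted.
def aLoop (decoded : String) : Nat → Bool → Bool → Bool → Int → List Char → Int → Option (Int × List Char)
  | 0, _, _, _, _, _, _ => none
  | fuel+1, done, last_group, counting, cc, bc, i =>
    if done then some (i, bc)
    else if counting = false then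
      match PySem.Str.pyGet? decoded i with
      | none => none
      | some c => aLoop decoded fuel done (if c = '0' then true else last_group) true cc bc (i+1)
    else if cc = 4 then
      if last_group then aLoop decoded fuel true last_group counting cc bc i
      else aLoop decoded fuel done last_group false 0 bc i
    else
      match PySem.Str.pyGet? decoded i with
      | none => none
      | some c => aLoop decoded fuel done last_group counting (cc+1) (bc ++ [c]) (i+1)

def handle_literal_py (i : Int) (decoded : String) : Int × Int :=
  if i ≥ PySem.Str.len decoded then (i, 0)
  else
    match aLoop decoded (6 * (decoded.toList.length + i.natAbs + 1) + 1) false false false 0 [] i with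
    | some (i', bc) =>
      match PySem.Int.ofCharsBase? bc 2 with   -- int(b_collector, 2); none = ValueError
      | some v => (i', v)
      | none => (0, 0)                          -- A raises here; outside Pre_
    | none => (0, 0)                            -- A raises here; outside Pre_

-- ===== PORT B =====
-- B's pass 1: 'k = 0; while decoded[i + 5*k] != '0': k += 1' — scans only the flag
-- bits; fuel only makes the loop total (none = IndexError / fuel exhausted)
def bFindK (decoded : String) : Nat → Int → Option Nat
  | 0, _ => none
  | f+1, p =>
    match PySem.Str.pyGet? decoded p with
    | none => none
    | some c => if c = '0' then some 0 else (bFindK decoded f (p + 5)).map (· + 1)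

-- B's inner 'for m in range(4)': the four data bits of the group whose flag is at p
-- (unrolled; none = IndexError on any of the four reads)
def bGroup4 (decoded : String) (p : Int) : Option (List Char) :=
  match PySem.Str.pyGet? decoded (p+1), PySem.Str.pyGet? decoded (p+2),
        PySem.Str.pyGet? decoded (p+3), PySem.Str.pyGet? decoded (p+4) with
  | some a, some b, some c, some d => some [a, b, c, d]
  | _, _, _, _ => none

-- B's pass 2: the join over 'for j in range(k+1)', groups in order, 4 bits each
def bBits (decoded : String) : Int → Nat → Option (List Char)
  | p, 0 => bGroup4 decoded p
  | p, k+1 =>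
    match bGroup4 decoded p with
    | none => none
    | some g => (bBits decoded (p + 5) k).map (g ++ ·)

def handle_literal_py_alt (i : Int) (decoded : String) : Int × Int :=
  if i ≥ PySem.Str.len decoded then (i, 0)
  else
    match bFindK decoded (decoded.toList.length + i.natAbs + 1) i with
    | none => (0, 0)                             -- B raises here; outside Pre_
    | some k =>
      match bBits decoded i k with
      | none => (0, 0)                           -- B raises here; outside Pre_
      | some bits =>
        match PySem.Int.ofCharsBase? bits 2 with -- int(bits, 2)
        | some v => (i + 5 * ((k : Int) + 1), v)
        | none => (0, 0)                         -- B raises here; outside Pre_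

-- ===== PRECONDITION & SPEC =====
-- true iff decoded[p] exists and is not '0' (a group flag that continues the literal)
def pvFlagCont (decoded : String) (p : Int) : Bool :=
  match PySem.Str.pyGet? decoded p with
  | some c => c != '0'
  | none => false

-- the data characters of groups 0..k read from position i (4 per group, flag skipped)
def pvBits (decoded : String) (i : Int) (k : Nat) : List Char :=
  (List.range (k+1)).flatMap (fun j =>
    (List.range 4).filterMap (fun m => PySem.Str.pyGet? decoded (i + 5*(j:Int) + 1 + (m:Int))))

-- Pre_: exactly the inputs where Python A returns normally: either the initial guard fires,
-- or k+1 whole 5-bit groups are readable (negative indices wrap as in Python), groups before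
-- k have a non-'0' flag, group k has flag '0', and int(bits, 2) accepts the collected chars.
def Pre_handle_literal_py (i : Int) (decoded : String) : Prop :=
  i ≥ PySem.Str.len decoded ∨
  ∃ k < decoded.toList.length + 1,
    (∀ j < k, pvFlagCont decoded (i + 5*(j:Int)) = true) ∧
    PySem.Str.pyGet? decoded (i + 5*(k:Int)) = some '0' ∧
    (∀ j < 5*(k+1), PySem.Str.pyGet? decoded (i + (j:Int)) ≠ none) ∧
    PySem.Int.ofCharsBase? (pvBits decoded i k) 2 ≠ none
instance (i : Int) (decoded : String) : Decidable (Pre_handle_literal_py i decoded) := by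
  unfold Pre_handle_literal_py; infer_instance

def pvWitness_handle_literal_py : Int × String := (0, "01111")

def Spec_handle_literal_py (i : Int) (decoded : String) (out : Int × Int) : Prop := out = handle_literal_py_alt i decoded
instance (i : Int) (decoded : String) (out : Int × Int) : Decidable (Spec_handle_literal_py i decoded out) := by unfold Spec_handle_literal_py; infer_instance

-- ===== CLAIM (what is proved, stated in full; the proofs are below) =====
def Claim_equal_handle_literal_py : Prop := ∀ (i : Int) (decoded : String), Dom_handle_literal_py i decoded → Pre_handle_literal_py i decoded → Spec_handle_literal_py i decoded (handle_literal_py i decoded)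

-- ===== LEMMAS AND PROOFS =====

-- proof-only intermediate: A's state machine viewed as a loop over 5-bit groups
-- (read flag, read 4 data bits, stop on flag '0'); used as a bridge between aLoop
-- and B's two staged passes
def pfRead (decoded : String) : Nat → Int → List Char → Option (Int × List Char)
  | 0, i, bits => some (i, bits)
  | n+1, i, bits =>
    match PySem.Str.pyGet? decoded i with
    | none => none
    | some c => pfRead decoded n (i+1) (bits ++ [c])

def pfGroup (decoded : String) : Nat → Int → List Char → Option (Int × List Char)
  | 0, _, _ => none
  | g+1, i, bits =>
    match PySem.Str.pyGet? decoded i with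
    | none => none
    | some flag =>
      match pfRead decoded 4 (i+1) bits with
      | none => none
      | some (i', bits') =>
        if flag = '0' then some (i', bits') else pfGroup decoded g i' bits'

theorem aLoop_zero (d : String) (done lg counting : Bool) (cc : Int) (bc : List Char) (i : Int) :
    aLoop d 0 done lg counting cc bc i = none := rfl

theorem aLoop_done (d : String) (fuel : Nat) (lg counting : Bool) (cc : Int) (bc : List Char) (i : Int) :
    aLoop d (fuel+1) true lg counting cc bc i = some (i, bc) := by simp [aLoop]

theorem aLoop_flag (d : String) (fuel : Nat) (lg : Bool) (cc : Int) (bc : List Char) (i : Int) :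
    aLoop d (fuel+1) false lg false cc bc i
      = match PySem.List.pyGet? d.toList i with
        | none => none
        | some c => aLoop d fuel false (if c = '0' then true else lg) true cc bc (i+1) := by
  simp [aLoop]

theorem aLoop_cc4 (d : String) (fuel : Nat) (lg : Bool) (bc : List Char) (i : Int) :
    aLoop d (fuel+1) false lg true 4 bc i
      = if lg then aLoop d fuel true lg true 4 bc i else aLoop d fuel false lg false 0 bc i := by
  simp [aLoop]

theorem aLoop_data_step (d : String) (fuel : Nat) (lg : Bool) (cc : Int) (bc : List Char) (i : Int)
    (hcc : ¬ cc = 4) :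
    aLoop d (fuel+1) false lg true cc bc i
      = match PySem.List.pyGet? d.toList i with
        | none => none
        | some c => aLoop d fuel false lg true (cc+1) (bc ++ [c]) (i+1) := by
  simp [aLoop, hcc]

theorem pfRead_zero (d : String) (i : Int) (bits : List Char) : pfRead d 0 i bits = some (i, bits) := rfl

theorem pfRead_succ (d : String) (n : Nat) (i : Int) (bits : List Char) :
    pfRead d (n+1) i bits
      = match PySem.List.pyGet? d.toList i with
        | none => none
        | some c => pfRead d n (i+1) (bits ++ [c]) := by
  simp [pfRead]

theorem pfGroup_zero (d : String) (i : Int) (bits : List Char) : pfGroup d 0 i bits = none := rfl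

theorem pfGroup_succ (d : String) (g : Nat) (i : Int) (bits : List Char) :
    pfGroup d (g+1) i bits
      = match PySem.List.pyGet? d.toList i with
        | none => none
        | some flag =>
          match pfRead d 4 (i+1) bits with
          | none => none
          | some (i', bits') =>
            if flag = '0' then some (i', bits') else pfGroup d g i' bits' := by
  simp [pfGroup]

-- A's four data-collecting iterations are the group loop's pfRead of 4 characters
theorem aLoop_data (decoded : String) (n : Nat) :
    ∀ (f : Nat) (lg : Bool) (bc : List Char) (i : Int),
    aLoop decoded (f + n) false lg true (4 - (n : Int)) bc i
      = (pfRead decoded n i bc).elim none (fun p => aLoop decoded f false lg true 4 p.2 p.1) := by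
  induction n with
  | zero =>
    intro f lg bc i
    simp only [Nat.add_zero, Nat.cast_zero, sub_zero, pfRead_zero, Option.elim]
  | succ n ih =>
    intro f lg bc i
    have hcc : ¬ ((4:Int) - ((n:Nat)+1 : Nat) = 4) := by push_cast; omega
    rw [show f + (n+1) = (f+n)+1 from rfl, aLoop_data_step _ _ _ _ _ _ hcc, pfRead_succ]
    cases h : PySem.List.pyGet? decoded.toList i with
    | none => simp
    | some c =>
      simp only
      rw [show (4:Int) - ((n:Nat)+1 : Nat) + 1 = 4 - (n:Int) from by push_cast; ring, ih]

-- one group of A's state machine (six loop iterations plus the done-exit) is one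
-- step of the group loop
theorem aLoop_eq_pfGroup (decoded : String) (g : Nat) :
    ∀ (i : Int) (bc : List Char),
    aLoop decoded (6*g+1) false false false 0 bc i = pfGroup decoded g i bc := by
  induction g with
  | zero =>
    intro i bc
    rw [show 6*0+1 = 0+1 from rfl, aLoop_flag, pfGroup_zero]
    cases h : PySem.List.pyGet? decoded.toList i <;> simp [aLoop_zero]
  | succ g ih =>
    intro i bc
    rw [show 6*(g+1)+1 = ((6*g+2)+4)+1 from by ring, aLoop_flag, pfGroup_succ]
    cases h : PySem.List.pyGet? decoded.toList i with
    | none => simp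
    | some c =>
      simp only
      rw [show (0:Int) = 4 - ((4:Nat) : Int) from by norm_num,
          aLoop_data decoded 4 (6*g+2) _ bc (i+1)]
      cases hb : pfRead decoded 4 (i+1) bc with
      | none => simp
      | some p =>
        obtain ⟨i', bc'⟩ := p
        simp only [Option.elim]
        rw [show 6*g+2 = (6*g+1)+1 from rfl, aLoop_cc4]
        by_cases hc : c = '0'
        · rw [if_pos (by simp [hc]), show 6*g+1 = (6*g)+1 from rfl, aLoop_done, if_pos hc]
        · rw [if_neg (by simp [hc]),
              show (if c = '0' then true else false) = false from by simp [hc], ih]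
          simp [hc]

-- pfRead of 4 characters is B's unrolled four-bit group read
theorem pfRead4_eq_bGroup4 (d : String) (i : Int) (acc : List Char) :
    pfRead d 4 (i+1) acc = (bGroup4 d i).map (fun g => (i+5, acc ++ g)) := by
  have e2 : i+1+1 = i+2 := by ring
  have e3 : i+2+1 = i+3 := by ring
  have e4 : i+3+1 = i+4 := by ring
  have e5 : i+4+1 = i+5 := by ring
  rw [show (4:Nat) = 3+1 from rfl, pfRead_succ]
  unfold bGroup4
  simp only [PySem.Str.pyGet?]
  cases h1 : PySem.List.pyGet? d.toList (i+1) with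
  | none => simp [h1]
  | some a =>
    simp only
    rw [show (3:Nat) = 2+1 from rfl, pfRead_succ, e2]
    cases h2 : PySem.List.pyGet? d.toList (i+2) with
    | none => simp [h1, h2]
    | some b =>
      simp only
      rw [show (2:Nat) = 1+1 from rfl, pfRead_succ, e3]
      cases h3 : PySem.List.pyGet? d.toList (i+3) with
      | none => simp [h1, h2, h3]
      | some c =>
        simp only
        rw [show (1:Nat) = 0+1 from rfl, pfRead_succ, e4]
        cases h4 : PySem.List.pyGet? d.toList (i+4) with
        | none => simp [h1, h2, h3, h4]
        | some e =>
          simp only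
          rw [pfRead_zero, e5]
          simp [h1, h2, h3, h4]

-- small equation lemmas for B's two passes
theorem bBits_zero (d : String) (p : Int) : bBits d p 0 = bGroup4 d p := rfl

theorem bBits_succ (d : String) (p : Int) (k : Nat) :
    bBits d p (k+1)
      = match bGroup4 d p with
        | none => none
        | some g => (bBits d (p+5) k).map (g ++ ·) := rfl

theorem bFindK_succ (d : String) (f : Nat) (p : Int) :
    bFindK d (f+1) p
      = match PySem.List.pyGet? d.toList p with
        | none => none
        | some c => if c = '0' then some 0 else (bFindK d f (p+5)).map (· + 1) := by
  simp [bFindK, PySem.Str.pyGet?]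

-- the group loop is B's two staged passes: group count first, then positional bits
theorem pfGroup_eq_two_pass (decoded : String) (g : Nat) :
    ∀ (i : Int) (acc : List Char),
    pfGroup decoded g i acc
      = (bFindK decoded g i).bind (fun k =>
          (bBits decoded i k).map (fun bs => (i + 5 * ((k:Int) + 1), acc ++ bs))) := by
  induction g with
  | zero => intro i acc; rw [pfGroup_zero]; rfl
  | succ g ih =>
    intro i acc
    rw [pfGroup_succ, bFindK_succ]
    cases h : PySem.List.pyGet? decoded.toList i with
    | none => simp
    | some c =>
      simp only
      rw [pfRead4_eq_bGroup4]
      by_cases hc : c = '0'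
      · rw [if_pos hc]
        cases hg4 : bGroup4 decoded i with
        | none => simp [bBits_zero, hg4]
        | some g0 =>
          simp [hc, bBits_zero, hg4]
      · rw [if_neg hc]
        cases hg4 : bGroup4 decoded i with
        | none =>
          cases hf : bFindK decoded g (i+5) with
          | none => simp
          | some k => simp [bBits_succ, hg4]
        | some g0 =>
          simp only [Option.map_some]
          rw [if_neg hc, ih]
          cases hf : bFindK decoded g (i+5) with
          | none => simp
          | some k =>
            simp only [Option.map_some, Option.bind_some, bBits_succ, hg4]
            cases hbb : bBits decoded (i+5) k with
            | none => simp
            | some bs =>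
              simp [List.append_assoc]
              ring

-- the two ports agree on every input (A's fuel is six units plus one per group-fuel
-- unit, which aLoop_eq_pfGroup requires; both sides use the same group fuel)
theorem ports_eq (i : Int) (decoded : String) :
    handle_literal_py i decoded = handle_literal_py_alt i decoded := by
  unfold handle_literal_py handle_literal_py_alt
  by_cases hg : i ≥ PySem.Str.len decoded
  · rw [if_pos hg, if_pos hg]
  · rw [if_neg hg, if_neg hg,
        aLoop_eq_pfGroup decoded (decoded.toList.length + i.natAbs + 1),
        pfGroup_eq_two_pass]
    cases hf : bFindK decoded (decoded.toList.length + i.natAbs + 1) i with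
    | none => rfl
    | some k =>
      simp only [Option.bind_some]
      cases hb : bBits decoded i k with
      | none => simp
      | some bits =>
        simp only [Option.map_some, List.nil_append]

-- ===== VERDICT (by name: the statement is the Claim_ definition above) =====
theorem handle_literal_py_spec : Claim_equal_handle_literal_py := by
  intro i decoded _ _
  unfold Spec_handle_literal_py
  exact ports_eq i decoded
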